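-- pv_equiv track=rewrite | github.com/sunnie1239/py_stock | stock.py | three_days
-- ===== SOURCE A (Python) =====
-- def three_days(data):
--
--     result    = []
--     yesterday = data[0]
--     cnt_up    = 0
--     cnt_down  = 0
--
--     for d in data:
--         if d - yesterday > 0:
--             cnt_up += 1
--             cnt_down = 0
--         elif d - yesterday < 0:
--             cnt_up = 0
--             cnt_down += 1
--         else: # 持平
--             cnt_up = 0
--             cnt_down = 0
--
--         yesterday = d
--
--         if cnt_up >= 3 and cnt_down == 0:
--             result.append(1) # 連三漲
--         elif cnt_down >= 3 and cnt_up == 0: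
--             result.append(-1) # 連三跌
--         else:
--             result.append(0) # 其他
--
--     return result
-- ===== SOURCE B (Python) =====
-- def three_days(data):
--     prev = data[0]
--     signs = []
--     for d in data:
--         signs.append(1 if d > prev else -1 if d < prev else 0)
--         prev = d
--     out = []
--     for a, b, c in zip([0, 0] + signs, [0] + signs, signs):
--         if (a, b, c) == (1, 1, 1):
--             out.append(1)
--         elif (a, b, c) == (-1, -1, -1):
--             out.append(-1)
--         else:
--             out.append(0)
--     return out
-- ===== Notes on version B (the rewrite author's own statement) =====
-- stated objective: alternative
-- what changed: Replaces A's single-pass running up/down counters with a two-pass decomposition: first build the list of day-over-day trend signs, then label each day by zipping three shifted copies of that sign list (a sliding window of the last three signs).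
import Mathlib
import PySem

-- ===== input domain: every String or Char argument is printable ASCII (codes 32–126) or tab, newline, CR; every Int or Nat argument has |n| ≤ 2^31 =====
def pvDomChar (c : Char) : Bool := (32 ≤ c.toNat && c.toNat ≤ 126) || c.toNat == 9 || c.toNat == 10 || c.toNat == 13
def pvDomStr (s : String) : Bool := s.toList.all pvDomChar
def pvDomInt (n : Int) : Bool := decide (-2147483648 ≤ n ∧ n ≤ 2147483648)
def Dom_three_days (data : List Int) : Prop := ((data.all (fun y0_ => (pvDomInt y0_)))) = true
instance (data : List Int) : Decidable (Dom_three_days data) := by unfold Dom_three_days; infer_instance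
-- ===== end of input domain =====

-- B replaces A's running up/down counters by a trend-sign list plus a zipped 3-wide window scan; same O(n) cost, different decomposition.
-- Both A and B raise IndexError on [] (data[0]); Pre_ excludes the empty list.

-- ===== PORT A =====
-- the for-loop of A: state (yesterday, cnt_up, cnt_down), appending one label per element
def threeLoop (yesterday cu cd : Int) : List Int → List Int
  | [] => []
  | d :: rest =>
    let cu' : Int := if d - yesterday > 0 then cu + 1 else 0
    let cd' : Int := if d - yesterday > 0 then 0 else if d - yesterday < 0 then cd + 1 else 0
    (if cu' ≥ 3 ∧ cd' = 0 then (1 : Int) else if cd' ≥ 3 ∧ cu' = 0 then -1 else 0)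
      :: threeLoop d cu' cd' rest

def three_days (data : List Int) : List Int :=
  match PySem.List.pyGet? data 0 with       -- data[0]: raises on []; excluded by Pre_
  | none => []
  | some y => threeLoop y 0 0 data

-- ===== PORT B =====
-- first pass of Source B: signs.append(1 if d > prev else -1 if d < prev else 0); prev = d
def signsFrom (prev : Int) : List Int → List Int
  | [] => []
  | d :: rest => (if d > prev then (1 : Int) else if d < prev then -1 else 0) :: signsFrom d rest

def three_days_alt (data : List Int) : List Int :=
  match PySem.List.pyGet? data 0 with       -- data[0]: raises on []; excluded by Pre_
  | none => []
  | some p =>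
    let signs := signsFrom p data
    -- zip([0,0]+signs, [0]+signs, signs): Python's 3-way zip as two nested List.zip (exact: same triples, same length)
    (List.zip (List.zip (0 :: 0 :: signs) (0 :: signs)) signs).map
      (fun x => if x = ((1, 1), 1) then (1 : Int) else if x = (((-1), -1), -1) then -1 else 0)

-- ===== PRECONDITION & SPEC =====
-- A evaluates data[0] and raises IndexError on the empty list, so Pre_ excludes only [].
def Pre_three_days (data : List Int) : Prop := data ≠ []
instance (data : List Int) : Decidable (Pre_three_days data) := by unfold Pre_three_days; infer_instance
def pvWitness_three_days : List Int := [1, 2, 3, 4]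

def Spec_three_days (data : List Int) (out : List Int) : Prop := out = three_days_alt data
instance (data : List Int) (out : List Int) : Decidable (Spec_three_days data out) := by unfold Spec_three_days; infer_instance

-- ===== CLAIM (what is proved, stated in full; the proofs are below) =====
def Claim_equal_three_days : Prop := ∀ (data : List Int), Dom_three_days data → Pre_three_days data → Spec_three_days data (three_days data)

-- ===== LEMMAS AND PROOFS =====

-- reference recursion: label each sign from the window (two-back, one-back, current)
def labelRec (s2 s1 : Int) : List Int → List Int
  | [] => []
  | s :: rest =>
    (if s2 = 1 ∧ s1 = 1 ∧ s = 1 then (1 : Int)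
     else if s2 = -1 ∧ s1 = -1 ∧ s = -1 then -1 else 0) :: labelRec s1 s rest

lemma zip_eq_label (s : List Int) : ∀ (a b : Int),
    (List.zip (List.zip (a :: b :: s) (b :: s)) s).map
      (fun x => if x = ((1, 1), 1) then (1 : Int) else if x = (((-1), -1), -1) then -1 else 0)
    = labelRec a b s := by
  induction s with
  | nil => intro a b; rfl
  | cons c t ih =>
    intro a b
    have h := ih b c
    simp only [List.zip_cons_cons, List.map_cons, labelRec] at h ⊢
    exact List.cons_eq_cons.mpr ⟨by simp [Prod.mk.injEq, and_assoc], h⟩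

lemma loop_eq_label (xs : List Int) : ∀ (prev cu cd s2 s1 : Int),
    0 ≤ cu → 0 ≤ cd →
    (1 ≤ cu ↔ s1 = 1) → (2 ≤ cu ↔ (s2 = 1 ∧ s1 = 1)) →
    (1 ≤ cd ↔ s1 = -1) → (2 ≤ cd ↔ (s2 = -1 ∧ s1 = -1)) →
    threeLoop prev cu cd xs = labelRec s2 s1 (signsFrom prev xs) := by
  induction xs with
  | nil => intros; rfl
  | cons d rest ih =>
    intro prev cu cd s2 s1 hcu0 hcd0 hcu1 hcu2 hcd1 hcd2
    simp only [threeLoop, signsFrom, labelRec]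
    by_cases hup : d - prev > 0
    · have hgt : d > prev := by omega
      rw [if_pos hup, if_pos hup, if_pos hgt]
      refine List.cons_eq_cons.mpr ⟨?_, ?_⟩
      · -- emitted label: cu+1 ≥ 3 ∧ 0 = 0  ↔  s2 = 1 ∧ s1 = 1 ∧ 1 = 1
        by_cases h3 : (2:Int) ≤ cu <;> simp_all <;> omega
      · exact ih d (cu + 1) 0 s1 1 (by omega) le_rfl (by omega)
          (by constructor <;> intro h <;> simp_all <;> omega)
          (by constructor <;> intro h <;> [omega; exact absurd h (by norm_num)])
          (by constructor <;> intro h <;> [omega; exact absurd h (by norm_num)])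
    · rw [if_neg hup, if_neg hup]
      have hngt : ¬ d > prev := by omega
      rw [if_neg hngt]
      by_cases hdn : d - prev < 0
      · have hlt : d < prev := by omega
        rw [if_pos hdn, if_pos hlt]
        refine List.cons_eq_cons.mpr ⟨?_, ?_⟩
        · by_cases h3 : (2:Int) ≤ cd <;> simp_all <;> omega
        · exact ih d 0 (cd + 1) s1 (-1) le_rfl (by omega)
            (by constructor <;> intro h <;> [omega; exact absurd h (by norm_num)])
            (by constructor <;> intro h <;> [omega; exact absurd h (by norm_num)])
            (by constructor <;> intro h <;> simp_all <;> omega)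
            (by constructor <;> intro h <;> simp_all <;> omega)
      · have hlt : ¬ d < prev := by omega
        rw [if_neg hdn, if_neg hlt]
        refine List.cons_eq_cons.mpr ⟨?_, ?_⟩
        · simp_all <;> omega
        · exact ih d 0 0 s1 0 le_rfl le_rfl
            (by constructor <;> intro h <;> [omega; exact absurd h (by norm_num)])
            (by constructor <;> intro h <;> [omega; simp_all])
            (by constructor <;> intro h <;> [omega; exact absurd h (by norm_num)])
            (by constructor <;> intro h <;> [omega; simp_all])

-- ===== VERDICT (by name: the statement is the Claim_ definition above) =====
theorem three_days_spec : Claim_equal_three_days := by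
  intro data _ hpre
  unfold Spec_three_days three_days three_days_alt
  match data with
  | [] => exact absurd rfl hpre
  | x :: xs =>
    have hget : PySem.List.pyGet? (x :: xs) 0 = some x := by
      simp [PySem.List.pyGet?, PySem.List.pyIdx?]
    rw [hget]
    show threeLoop x 0 0 (x :: xs) =
      List.map (fun x => if x = ((1, 1), 1) then (1 : Int) else if x = (((-1), -1), -1) then -1 else 0)
        (((0 :: 0 :: signsFrom x (x :: xs)).zip (0 :: signsFrom x (x :: xs))).zip (signsFrom x (x :: xs)))
    rw [zip_eq_label,
      loop_eq_label (x :: xs) x 0 0 0 0 le_rfl le_rfl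
        (by norm_num) (by norm_num) (by norm_num) (by norm_num)]
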